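-- pv_equiv track=rewrite | github.com/umatt1/website | markov_chainer.py | generate_nth_order_markov_model
-- ===== SOURCE A (Python) =====
-- def generate_nth_order_markov_model(sentences, n=1):
--     """
--     sentences: list of statements to build markov model using
--     n: integer of order of markov model. default = 1
--     returns markov model dictionary {n length string tuples: string}
--     """
--     markov_model = {}
--     for sentence in sentences:
--         if sentence == "" or sentence == " ":
--             continue
--         sentence = sentence.split()
--         for i in range(n):
--             sentence.insert(0, "*S*")
--         sentence.append("*E*")
--         for i in range(0, len(sentence)-n):
--             words = tuple(sentence[i:i+n])
--             # check if words are in the markov model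
--             if words in markov_model.keys():
--                 # if they are, either increment the new word
--                 if sentence[i+n] in markov_model[words].keys():
--                     markov_model[words][sentence[i+n]] += 1
--                 # or add the new word
--                 else:
--                     markov_model[words][sentence[i+n]] = 1
--             # if not, add to the markov model
--             else:
--                 markov_model[words] = {}
--                 markov_model[words][sentence[i+n]] = 1
--     return markov_model
-- ===== SOURCE B (Python) =====
-- def generate_nth_order_markov_model(sentences, n=1):
--     """
--     sentences: list of statements to build markov model using
--     n: integer of order of markov model. default = 1
--     returns markov model dictionary {n length string tuples: string}
--     """
--     # Phase 1: one flat counter keyed by (ngram tuple, next word) pairs.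
--     counts = {}
--     for sentence in sentences:
--         if sentence == "" or sentence == " ":
--             continue
--         padded = ["*S*"] * n + sentence.split() + ["*E*"]
--         for i in range(len(padded) - n):
--             pair = (tuple(padded[i:i + n]), padded[i + n])
--             counts[pair] = counts.get(pair, 0) + 1
--     # Phase 2: reshape the flat counter into the nested model.
--     model = {}
--     for (ngram, word), c in counts.items():
--         model.setdefault(ngram, {})[word] = c
--     return model
-- ===== Notes on version B (the rewrite author's own statement) =====
-- stated objective: alternative
-- what changed: Instead of incrementally maintaining the nested ngram->word->count dict with membership tests on both levels and padding via n repeated insert(0) calls, B builds the padded list by list arithmetic, collects all (ngram, next-word) pairs into one flat counting dict in a single pass, and reshapes that flat counter into the nested model in a separate final pass.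
import Mathlib
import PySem

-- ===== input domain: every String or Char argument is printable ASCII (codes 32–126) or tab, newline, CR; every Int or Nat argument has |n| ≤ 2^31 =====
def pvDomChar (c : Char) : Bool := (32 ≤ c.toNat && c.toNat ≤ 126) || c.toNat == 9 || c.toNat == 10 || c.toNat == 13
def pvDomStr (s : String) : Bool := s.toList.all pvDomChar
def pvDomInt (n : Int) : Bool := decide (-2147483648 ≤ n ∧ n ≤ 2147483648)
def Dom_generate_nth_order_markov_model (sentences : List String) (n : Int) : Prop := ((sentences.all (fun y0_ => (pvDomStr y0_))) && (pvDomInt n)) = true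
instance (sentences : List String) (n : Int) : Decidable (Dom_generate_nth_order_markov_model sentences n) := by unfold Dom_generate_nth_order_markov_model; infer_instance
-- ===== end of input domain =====

-- B builds one flat (ngram, next-word) pair-count dict in a single pass (padding by list arithmetic
-- instead of A's repeated insert(0)) and reshapes it into the nested model in a second pass;
-- a genuinely different two-phase organisation with the same return value as A wherever A returns.

-- ===== PORT A =====
-- A's inner loop body: where Python's padded[i+n] raises IndexError (excluded by Pre_), the port skips.
def pvAStep (ws : List String) (n : Int)
    (mm : PySem.Dict (List String) (PySem.Dict String Int)) (i : Int) :
    PySem.Dict (List String) (PySem.Dict String Int) :=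
  let words := PySem.List.slice ws (some i) (some (i + n))
  match PySem.List.pyGet? ws (i + n) with
  | none => mm
  | some nxt =>
    if mm.contains words then
      let inner := mm.getD words PySem.Dict.empty
      if inner.contains nxt then
        mm.insert words (inner.insert nxt (inner.getD nxt 0 + 1))
      else
        mm.insert words (inner.insert nxt 1)
    else
      mm.insert words (PySem.Dict.empty.insert nxt 1)

-- A's per-sentence body: split, insert(0, "*S*") n times, append "*E*", then the indexed loop.
def pvASentence (n : Int) (mm : PySem.Dict (List String) (PySem.Dict String Int))
    (sentence : String) : PySem.Dict (List String) (PySem.Dict String Int) :=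
  if sentence = "" ∨ sentence = " " then mm
  else
    let ws := ((PySem.List.pyRange 0 n 1).foldl (fun l _ => "*S*" :: l)
                (PySem.Str.split₀ sentence)) ++ ["*E*"]
    (PySem.List.pyRange 0 ((ws.length : Int) - n) 1).foldl (pvAStep ws n) mm

def generate_nth_order_markov_model (sentences : List String) (n : Int) :
    List (List String × List (String × Int)) :=
  (sentences.foldl (pvASentence n) PySem.Dict.empty).items.map (fun p => (p.1, p.2.items))

-- ===== PORT B =====
-- B's inner loop body: count the pair (padded[i:i+n], padded[i+n]); the skip on none is Python's IndexError (excluded by Pre_).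
def pvBStep (padded : List String) (n : Int)
    (counts : PySem.Dict (List String × String) Int) (i : Int) :
    PySem.Dict (List String × String) Int :=
  match PySem.List.pyGet? padded (i + n) with
  | none => counts
  | some w =>
    let pr := (PySem.List.slice padded (some i) (some (i + n)), w)
    counts.insert pr (counts.getD pr 0 + 1)

def pvBSentence (n : Int) (counts : PySem.Dict (List String × String) Int)
    (sentence : String) : PySem.Dict (List String × String) Int :=
  if sentence = "" ∨ sentence = " " then counts
  else
    let padded := List.replicate n.toNat "*S*" ++ PySem.Str.split₀ sentence ++ ["*E*"]
    (PySem.List.pyRange 0 ((padded.length : Int) - n) 1).foldl (pvBStep padded n) counts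

-- B's reshape step: model.setdefault(ngram, {})[word] = c
def pvBReshape (m : PySem.Dict (List String) (PySem.Dict String Int))
    (q : (List String × String) × Int) :
    PySem.Dict (List String) (PySem.Dict String Int) :=
  let m1 := m.setdefault q.1.1 PySem.Dict.empty
  m1.insert q.1.1 ((m1.getD q.1.1 PySem.Dict.empty).insert q.1.2 q.2)

def generate_nth_order_markov_model_alt (sentences : List String) (n : Int) :
    List (List String × List (String × Int)) :=
  (((sentences.foldl (pvBSentence n) PySem.Dict.empty).items.foldl pvBReshape
      PySem.Dict.empty).items).map (fun p => (p.1, p.2.items))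

-- ===== PRECONDITION & SPEC =====
-- Pre_ excludes exactly the inputs on which Python A raises IndexError: a kept (non-"", non-" ")
-- sentence whose split has fewer than -n-1 words (possible only for n < -1) makes padded[i+n] go out of range.
def Pre_generate_nth_order_markov_model (sentences : List String) (n : Int) : Prop :=
  ∀ s ∈ sentences, s = "" ∨ s = " " ∨ -(((PySem.Str.split₀ s).length : Int) + 1) ≤ n

instance (sentences : List String) (n : Int) :
    Decidable (Pre_generate_nth_order_markov_model sentences n) := by
  unfold Pre_generate_nth_order_markov_model; infer_instance

def pvWitness_generate_nth_order_markov_model : List String × Int := (["a b a", "", " ", "b a"], 1)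

def Spec_generate_nth_order_markov_model (sentences : List String) (n : Int) (out : List (List String × List (String × Int))) : Prop := out = generate_nth_order_markov_model_alt sentences n
instance (sentences : List String) (n : Int) (out : List (List String × List (String × Int))) : Decidable (Spec_generate_nth_order_markov_model sentences n out) := by unfold Spec_generate_nth_order_markov_model; infer_instance

-- ===== CLAIM (what is proved, stated in full; the proofs are below) =====
def Claim_equal_generate_nth_order_markov_model : Prop := ∀ (sentences : List String) (n : Int), Dom_generate_nth_order_markov_model sentences n → Pre_generate_nth_order_markov_model sentences n → Spec_generate_nth_order_markov_model sentences n (generate_nth_order_markov_model sentences n)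

-- ===== LEMMAS AND PROOFS =====

-- The stream of (ngram, next-word) pairs both programs process, and uniform step functions.
def pvPair (ws : List String) (n : Int) (i : Int) : Option (List String × String) :=
  (PySem.List.pyGet? ws (i + n)).map (fun w => (PySem.List.slice ws (some i) (some (i + n)), w))

def pvPairs (ws : List String) (n : Int) : List (List String × String) :=
  (PySem.List.pyRange 0 ((ws.length : Int) - n) 1).filterMap (pvPair ws n)

def pvPadded (s : String) (n : Int) : List String :=
  List.replicate n.toNat "*S*" ++ PySem.Str.split₀ s ++ ["*E*"]

def pvAllPairs (sentences : List String) (n : Int) : List (List String × String) :=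
  sentences.flatMap (fun s => if s = "" ∨ s = " " then [] else pvPairs (pvPadded s n) n)

def pvNStep (m : PySem.Dict (List String) (PySem.Dict String Int))
    (p : List String × String) : PySem.Dict (List String) (PySem.Dict String Int) :=
  m.insert p.1 ((m.getD p.1 PySem.Dict.empty).insert p.2
    ((m.getD p.1 PySem.Dict.empty).getD p.2 0 + 1))

def pvCStep (c : PySem.Dict (List String × String) Int) (p : List String × String) :
    PySem.Dict (List String × String) Int :=
  c.insert p (c.getD p 0 + 1)

def pvRStep (m : PySem.Dict (List String) (PySem.Dict String Int))
    (q : (List String × String) × Int) : PySem.Dict (List String) (PySem.Dict String Int) :=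
  m.insert q.1.1 ((m.getD q.1.1 PySem.Dict.empty).insert q.1.2 q.2)

def pvIStep (d : PySem.Dict String Int) (wv : String × Int) : PySem.Dict String Int :=
  d.insert wv.1 wv.2

lemma pv_foldl_cons_const {α β : Type} (x : α) :
    ∀ (l : List β) (ws : List α),
      l.foldl (fun acc _ => x :: acc) ws = List.replicate l.length x ++ ws := by
  intro l
  induction l with
  | nil => intro ws; rfl
  | cons b l ih => intro ws; simp [ih, List.replicate_succ', List.append_assoc]

lemma pv_length_pyRange (n : Int) : (PySem.List.pyRange 0 n 1).length = n.toNat := by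
  rcases le_or_gt n 0 with h | h
  · rw [PySem.List.pyRange_one_eq_nil h]
    simp [Int.toNat_of_nonpos h]
  · have hn : n = ((n.toNat : Nat) : Int) := by omega
    rw [hn, PySem.List.pyRange_zero_natCast]
    simp
    omega

lemma pv_padded_A (s : String) (n : Int) :
    ((PySem.List.pyRange 0 n 1).foldl (fun l _ => "*S*" :: l) (PySem.Str.split₀ s)) ++ ["*E*"]
      = pvPadded s n := by
  rw [pv_foldl_cons_const, pv_length_pyRange, pvPadded, List.append_assoc]

lemma pv_A_step_none (ws : List String) (n : Int)
    (mm : PySem.Dict (List String) (PySem.Dict String Int)) (i : Int)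
    (h : pvPair ws n i = none) : pvAStep ws n mm i = mm := by
  have hg : PySem.List.pyGet? ws (i + n) = none := by
    simpa [pvPair] using h
  simp [pvAStep, hg]

lemma pv_A_step_some (ws : List String) (n : Int)
    (mm : PySem.Dict (List String) (PySem.Dict String Int)) (i : Int)
    (p : List String × String) (h : pvPair ws n i = some p) :
    pvAStep ws n mm i = pvNStep mm p := by
  rcases Option.map_eq_some_iff.mp h with ⟨nxt, hg, hp⟩
  subst hp
  simp only [pvAStep, hg]
  by_cases h1 : mm.contains (PySem.List.slice ws (some i) (some (i + n))) = true
  · by_cases h2 : (mm.getD (PySem.List.slice ws (some i) (some (i + n))) PySem.Dict.empty).contains nxt = true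
    · simp [pvNStep, h1, h2]
    · have h2' : (mm.getD (PySem.List.slice ws (some i) (some (i + n))) PySem.Dict.empty).getD nxt 0 = 0 :=
        PySem.Dict.getD_of_not_contains _ 0 (by simpa using h2)
      simp [pvNStep, h1, h2, h2']
  · have h1' : mm.getD (PySem.List.slice ws (some i) (some (i + n))) PySem.Dict.empty = PySem.Dict.empty :=
      PySem.Dict.getD_of_not_contains _ _ (by simpa using h1)
    simp [pvNStep, h1, h1', PySem.Dict.getD_empty]

lemma pv_B_step_none (padded : List String) (n : Int)
    (c : PySem.Dict (List String × String) Int) (i : Int)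
    (h : pvPair padded n i = none) : pvBStep padded n c i = c := by
  have hg : PySem.List.pyGet? padded (i + n) = none := by
    simpa [pvPair] using h
  simp [pvBStep, hg]

lemma pv_B_step_some (padded : List String) (n : Int)
    (c : PySem.Dict (List String × String) Int) (i : Int)
    (p : List String × String) (h : pvPair padded n i = some p) :
    pvBStep padded n c i = pvCStep c p := by
  rcases Option.map_eq_some_iff.mp h with ⟨w, hg, hp⟩
  subst hp
  simp [pvBStep, pvCStep, hg]

lemma pv_A_fold (ws : List String) (n : Int) :
    ∀ (l : List Int) (mm : PySem.Dict (List String) (PySem.Dict String Int)),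
      l.foldl (pvAStep ws n) mm = (l.filterMap (pvPair ws n)).foldl pvNStep mm := by
  intro l
  induction l with
  | nil => intro mm; rfl
  | cons a l ih =>
      intro mm
      rw [List.foldl_cons, List.filterMap_cons]
      cases h : pvPair ws n a with
      | none => rw [pv_A_step_none ws n mm a h]; exact ih mm
      | some p => rw [pv_A_step_some ws n mm a p h, List.foldl_cons]; exact ih _

lemma pv_B_fold (padded : List String) (n : Int) :
    ∀ (l : List Int) (c : PySem.Dict (List String × String) Int),
      l.foldl (pvBStep padded n) c = (l.filterMap (pvPair padded n)).foldl pvCStep c := by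
  intro l
  induction l with
  | nil => intro c; rfl
  | cons a l ih =>
      intro c
      rw [List.foldl_cons, List.filterMap_cons]
      cases h : pvPair padded n a with
      | none => rw [pv_B_step_none padded n c a h]; exact ih c
      | some p => rw [pv_B_step_some padded n c a p h, List.foldl_cons]; exact ih _

lemma pv_A_sentence (n : Int) (mm : PySem.Dict (List String) (PySem.Dict String Int))
    (s : String) :
    pvASentence n mm s
      = (if s = "" ∨ s = " " then [] else pvPairs (pvPadded s n) n).foldl pvNStep mm := by
  simp only [pvASentence]
  split
  · rfl
  · rw [pv_padded_A, pv_A_fold]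
    rfl

lemma pv_B_sentence (n : Int) (c : PySem.Dict (List String × String) Int) (s : String) :
    pvBSentence n c s
      = (if s = "" ∨ s = " " then [] else pvPairs (pvPadded s n) n).foldl pvCStep c := by
  simp only [pvBSentence]
  split
  · rfl
  · rw [pv_B_fold]
    rfl

lemma pv_A_top (n : Int) (sentences : List String) :
    ∀ mm, sentences.foldl (pvASentence n) mm = (pvAllPairs sentences n).foldl pvNStep mm := by
  induction sentences with
  | nil => intro mm; rfl
  | cons s ss ih =>
      intro mm
      rw [List.foldl_cons, pvAllPairs, List.flatMap_cons, List.foldl_append,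
          ← pv_A_sentence, ih]
      rfl

lemma pv_B_top (n : Int) (sentences : List String) :
    ∀ c, sentences.foldl (pvBSentence n) c = (pvAllPairs sentences n).foldl pvCStep c := by
  induction sentences with
  | nil => intro c; rfl
  | cons s ss ih =>
      intro c
      rw [List.foldl_cons, pvAllPairs, List.flatMap_cons, List.foldl_append,
          ← pv_B_sentence, ih]
      rfl

lemma pv_counts_eq_counter (ps : List (List String × String)) :
    ps.foldl pvCStep PySem.Dict.empty = PySem.Dict.counter ps := by
  have h : pvCStep = (fun (d : PySem.Dict (List String × String) Int) x =>
      d.insert x (d.getD x 0 + 1)) := rfl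
  rw [h, PySem.Dict.foldl_insert_getD_add_one_eq_counter]

lemma pv_counter_append (xs : List String) (x : String) :
    PySem.Dict.counter (xs ++ [x])
      = (PySem.Dict.counter xs).insert x ((PySem.Dict.counter xs).getD x 0 + 1) := by
  rw [← PySem.Dict.foldl_insert_getD_add_one_eq_counter,
      ← PySem.Dict.foldl_insert_getD_add_one_eq_counter, List.foldl_append]
  rfl

lemma pv_R_eq : pvBReshape = pvRStep := by
  funext m q
  simp only [pvBReshape, pvRStep]
  by_cases h : m.contains q.1.1 = true
  · rw [PySem.Dict.setdefault_of_contains _ _ h]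
  · rw [PySem.Dict.setdefault_of_not_contains _ _ (by simpa using h),
        PySem.Dict.getD_insert_self, PySem.Dict.insert_insert_self,
        PySem.Dict.getD_of_not_contains _ _ (by simpa using h)]

-- characterization of A's nested fold
lemma pv_N_keys (ps : List (List String × String)) :
    (ps.foldl pvNStep PySem.Dict.empty).keys = PySem.Set.ofList (ps.map (fun p => p.1)) := by
  have hstep : pvNStep = (fun (d : PySem.Dict (List String) (PySem.Dict String Int)) x =>
      d.insert x.1 ((d.getD x.1 PySem.Dict.empty).insert x.2
        ((d.getD x.1 PySem.Dict.empty).getD x.2 0 + 1))) := rfl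
  have h := PySem.Dict.keys_foldl_insert_key ps (fun p => p.1)
    (fun (d : PySem.Dict (List String) (PySem.Dict String Int)) p =>
      ((d.getD p.1 PySem.Dict.empty).insert p.2
        ((d.getD p.1 PySem.Dict.empty).getD p.2 0 + 1))) PySem.Dict.empty
  rw [hstep, h, PySem.Dict.keys_empty, PySem.Set.update_nil_left]

lemma pv_N_nodup (ps : List (List String × String)) :
    (ps.foldl pvNStep PySem.Dict.empty).keys.Nodup := by
  have hstep : pvNStep = (fun (d : PySem.Dict (List String) (PySem.Dict String Int)) x =>
      d.insert x.1 ((d.getD x.1 PySem.Dict.empty).insert x.2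
        ((d.getD x.1 PySem.Dict.empty).getD x.2 0 + 1))) := rfl
  have h := PySem.Dict.nodup_keys_foldl_insert_key ps (fun p => p.1)
    (fun (d : PySem.Dict (List String) (PySem.Dict String Int)) p =>
      ((d.getD p.1 PySem.Dict.empty).insert p.2
        ((d.getD p.1 PySem.Dict.empty).getD p.2 0 + 1))) PySem.Dict.empty
    (by rw [PySem.Dict.keys_empty]; exact List.nodup_nil)
  rw [hstep]
  exact h

lemma pv_N_inner (ps : List (List String × String)) (k : List String) :
    (ps.foldl pvNStep PySem.Dict.empty).getD k PySem.Dict.empty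
      = PySem.Dict.counter ((ps.filter (fun p => p.1 == k)).map (fun p => p.2)) := by
  induction ps using List.reverseRecOn with
  | nil => rfl
  | append_singleton ps p ih =>
      rw [List.foldl_append, List.foldl_cons, List.foldl_nil, List.filter_append]
      by_cases hk : k = p.1
      · subst hk
        rw [pvNStep, PySem.Dict.getD_insert_self, ih]
        have hfil : List.filter (fun q => q.1 == p.1) [p] = [p] := by simp
        rw [hfil, List.map_append, List.map_cons, List.map_nil, pv_counter_append]
      · have hne : ((fun q => q.1 == k) p) = false := by
          simp only [beq_eq_false_iff_ne, ne_eq]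
          exact fun hc => hk hc.symm
        rw [pvNStep, PySem.Dict.getD_insert, if_neg hk]
        simp only [List.filter_cons, hne, Bool.false_eq_true, if_false, List.filter_nil,
          List.append_nil]
        exact ih

-- characterization of B's reshape fold
lemma pv_R_keys (l : List ((List String × String) × Int)) :
    (l.foldl pvRStep PySem.Dict.empty).keys = PySem.Set.ofList (l.map (fun q => q.1.1)) := by
  have hstep : pvRStep = (fun (m : PySem.Dict (List String) (PySem.Dict String Int)) q =>
      m.insert q.1.1 ((m.getD q.1.1 PySem.Dict.empty).insert q.1.2 q.2)) := rfl
  have h := PySem.Dict.keys_foldl_insert_key l (fun q => q.1.1)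
    (fun m q => ((m.getD q.1.1 PySem.Dict.empty).insert q.1.2 q.2)) PySem.Dict.empty
  rw [hstep, h, PySem.Dict.keys_empty, PySem.Set.update_nil_left]

lemma pv_R_nodup (l : List ((List String × String) × Int)) :
    (l.foldl pvRStep PySem.Dict.empty).keys.Nodup := by
  have hstep : pvRStep = (fun (m : PySem.Dict (List String) (PySem.Dict String Int)) q =>
      m.insert q.1.1 ((m.getD q.1.1 PySem.Dict.empty).insert q.1.2 q.2)) := rfl
  have h := PySem.Dict.nodup_keys_foldl_insert_key l (fun q => q.1.1)
    (fun m q => ((m.getD q.1.1 PySem.Dict.empty).insert q.1.2 q.2)) PySem.Dict.empty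
    (by rw [PySem.Dict.keys_empty]; exact List.nodup_nil)
  rw [hstep]
  exact h

lemma pv_R_inner (l : List ((List String × String) × Int)) (k : List String) :
    (l.foldl pvRStep PySem.Dict.empty).getD k PySem.Dict.empty
      = ((l.filter (fun q => q.1.1 == k)).map (fun q => (q.1.2, q.2))).foldl pvIStep
          PySem.Dict.empty := by
  induction l using List.reverseRecOn with
  | nil => rfl
  | append_singleton l q ih =>
      rw [List.foldl_append, List.foldl_cons, List.foldl_nil, List.filter_append]
      by_cases hk : k = q.1.1
      · subst hk
        rw [pvRStep, PySem.Dict.getD_insert_self, ih]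
        have hfil : List.filter (fun r => r.1.1 == q.1.1) [q] = [q] := by simp
        rw [hfil, List.map_append, List.map_cons, List.map_nil, List.foldl_append]
        rfl
      · have hne : ((fun r => r.1.1 == k) q) = false := by
          simp only [beq_eq_false_iff_ne, ne_eq]
          exact fun hc => hk hc.symm
        rw [pvRStep, PySem.Dict.getD_insert, if_neg hk]
        simp only [List.filter_cons, hne, Bool.false_eq_true, if_false, List.filter_nil,
          List.append_nil]
        exact ih

-- dedup (Set.ofList) facts
lemma pv_ofList_map_ofList {α β : Type} [BEq α] [LawfulBEq α] [BEq β] [LawfulBEq β]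
    [DecidableEq α] (f : α → β) (xs : List α) :
    PySem.Set.ofList ((PySem.Set.ofList xs).map f) = PySem.Set.ofList (xs.map f) := by
  induction xs using List.reverseRecOn with
  | nil => rfl
  | append_singleton xs x ih =>
      rw [PySem.Set.ofList_append_singleton, List.map_append, List.map_cons, List.map_nil,
          PySem.Set.ofList_append_singleton, ← ih]
      by_cases hx : x ∈ PySem.Set.ofList xs
      · rw [PySem.Set.add_of_mem hx, PySem.Set.add_of_mem]
        rw [PySem.Set.mem_ofList]
        exact List.mem_map_of_mem hx
      · rw [PySem.Set.add_of_not_mem hx, List.map_append, List.map_cons, List.map_nil,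
            PySem.Set.ofList_append_singleton]

lemma pv_ofList_filter {α : Type} [BEq α] [LawfulBEq α] [DecidableEq α]
    (q : α → Bool) (xs : List α) :
    (PySem.Set.ofList xs).filter q = PySem.Set.ofList (xs.filter q) := by
  induction xs using List.reverseRecOn with
  | nil => rfl
  | append_singleton xs x ih =>
      rw [PySem.Set.ofList_append_singleton, List.filter_append]
      by_cases hx : x ∈ PySem.Set.ofList xs
      · rw [PySem.Set.add_of_mem hx, ih]
        by_cases hq : q x = true
        · have hfil : List.filter q [x] = [x] := by simp [hq]
          rw [hfil, PySem.Set.ofList_append_singleton, PySem.Set.add_of_mem]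
          rw [PySem.Set.mem_ofList, List.mem_filter]
          exact ⟨(PySem.Set.mem_ofList xs x).mp hx, hq⟩
        · have hfil : List.filter q [x] = [] := by simp [Bool.eq_false_iff.mpr hq]
          rw [hfil, List.append_nil]
      · rw [PySem.Set.add_of_not_mem hx, List.filter_append, ih]
        by_cases hq : q x = true
        · have hfil : List.filter q [x] = [x] := by simp [hq]
          rw [hfil, PySem.Set.ofList_append_singleton, PySem.Set.add_of_not_mem]
          rw [PySem.Set.mem_ofList, List.mem_filter]
          intro hc
          exact hx ((PySem.Set.mem_ofList xs x).mpr hc.1)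
        · have hfil : List.filter q [x] = [] := by simp [Bool.eq_false_iff.mpr hq]
          rw [hfil, List.append_nil, List.append_nil]

lemma pv_ofList_map_inj {α β : Type} [BEq α] [LawfulBEq α] [BEq β] [LawfulBEq β]
    [DecidableEq α] (f : α → β) (hf : Function.Injective f) (xs : List α) :
    PySem.Set.ofList (xs.map f) = (PySem.Set.ofList xs).map f := by
  induction xs using List.reverseRecOn with
  | nil => rfl
  | append_singleton xs x ih =>
      rw [List.map_append, List.map_cons, List.map_nil, PySem.Set.ofList_append_singleton,
          PySem.Set.ofList_append_singleton, ih]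
      by_cases hx : x ∈ PySem.Set.ofList xs
      · rw [PySem.Set.add_of_mem hx, PySem.Set.add_of_mem (List.mem_map_of_mem hx)]
      · rw [PySem.Set.add_of_not_mem hx, PySem.Set.add_of_not_mem, List.map_append,
            List.map_cons, List.map_nil]
        intro hc
        rcases List.mem_map.mp hc with ⟨a, ha, hfa⟩
        exact hx (hf hfa ▸ ha)

lemma pv_const_fst (k : List String) :
    ∀ (l : List (List String × String)), (∀ p ∈ l, p.1 = k) →
      l = (l.map (fun p => p.2)).map (fun w => (k, w)) := by
  intro l
  induction l with
  | nil => intro _; rfl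
  | cons p l ih =>
      intro h
      rw [List.map_cons, List.map_cons, ← ih (fun q hq => h q (List.mem_cons_of_mem _ hq))]
      have hp : p = (k, p.2) := Prod.ext (h p List.mem_cons_self) rfl
      exact congrArg (· :: l) hp

lemma pv_count (ps : List (List String × String)) (k : List String) (w : String) :
    ((ps.filter (fun p => p.1 == k)).map (fun p => p.2)).count w = ps.count (k, w) := by
  induction ps with
  | nil => rfl
  | cons p ps ih =>
      rw [List.count_cons, List.filter_cons]
      by_cases hk : p.1 = k
      · have hb : ((fun q => q.1 == k) p) = true := by simpa using hk
        rw [if_pos hb, List.map_cons, List.count_cons, ih]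
        congr 1
        have hbeq : (p == (k, w)) = (p.1 == k && p.2 == w) := rfl
        rw [hbeq]
        simp [hk]
      · have hb : ((fun q => q.1 == k) p) = false := by simpa using hk
        rw [if_neg (by simp [hb]), ih]
        have hbeq : (p == (k, w)) = (p.1 == k && p.2 == w) := rfl
        simp [hbeq, hk]

-- the two inner dicts agree
lemma pv_getD_eq (ps : List (List String × String)) (k : List String) :
    (ps.foldl pvNStep PySem.Dict.empty).getD k PySem.Dict.empty
      = (((PySem.Dict.counter ps).items).foldl pvRStep PySem.Dict.empty).getD k
          PySem.Dict.empty := by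
  rw [pv_N_inner, pv_R_inner, PySem.Dict.items_counter, List.filter_map, List.map_map]
  have hcomp : ((fun (q : (List String × String) × Int) => q.1.1 == k) ∘
      (fun p => (p, ((ps.count p : Int))))) = (fun (p : List String × String) => p.1 == k) := rfl
  rw [hcomp, pv_ofList_filter]
  have hconst : ps.filter (fun p => p.1 == k)
      = ((ps.filter (fun p => p.1 == k)).map (fun p => p.2)).map (fun w => (k, w)) := by
    apply pv_const_fst
    intro p hp
    simpa using (List.mem_filter.mp hp).2
  set wk := (ps.filter (fun p => p.1 == k)).map (fun p => p.2) with hwk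
  rw [hconst, pv_ofList_map_inj (fun w => (k, w))
        (fun a b h => by simpa using congrArg Prod.snd h), List.map_map]
  apply PySem.Dict.ext
  have hstep : pvIStep = (fun (d : PySem.Dict String Int) (a : String × Int) =>
      d.insert a.1 a.2) := rfl
  have hmap : (((fun (q : (List String × String) × Int) => (q.1.2, q.2)) ∘
        (fun k' => (k', (List.count k' ps : Int)))) ∘ (fun w => (k, w)))
      = (fun w => ((w, (List.count ((k, w)) ps : Int)) : String × Int)) := rfl
  rw [hstep, hmap]
  have hfresh := PySem.Dict.items_foldl_insert_fresh
    ((PySem.Set.ofList wk).map (fun w => ((w, (List.count ((k, w)) ps : Int)) : String × Int)))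
    Prod.fst Prod.snd PySem.Dict.empty
    (fun a _ => PySem.Dict.contains_empty a.1)
    (by
      rw [List.map_map]
      have hid : (Prod.fst ∘ (fun w => ((w, (List.count ((k, w)) ps : Int)) : String × Int)))
          = (fun w => w) := rfl
      rw [hid, List.map_id']
      exact PySem.Set.nodup_ofList wk)
  have hemp : (PySem.Dict.empty : PySem.Dict String Int).items = [] := rfl
  rw [hfresh, PySem.Dict.items_counter, hemp, List.nil_append, List.map_map]
  apply List.map_congr_left
  intro w hw
  have hc : wk.count w = ps.count (k, w) := pv_count ps k w
  simp [hc]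

-- A's fold and B's reshaped counter are the same dict
lemma pv_main (ps : List (List String × String)) :
    ps.foldl pvNStep PySem.Dict.empty
      = ((PySem.Dict.counter ps).items).foldl pvRStep PySem.Dict.empty := by
  apply PySem.Dict.ext
  rw [PySem.Dict.items_eq_map_keys _ (pv_N_nodup ps) PySem.Dict.empty,
      PySem.Dict.items_eq_map_keys _ (pv_R_nodup _) PySem.Dict.empty]
  have hkeys : (((PySem.Dict.counter ps).items).foldl pvRStep PySem.Dict.empty).keys
      = (ps.foldl pvNStep PySem.Dict.empty).keys := by
    rw [pv_R_keys, pv_N_keys, PySem.Dict.items_counter, List.map_map]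
    have hcomp : ((fun (q : (List String × String) × Int) => q.1.1) ∘
        (fun p => (p, ((ps.count p : Int))))) = (fun (p : List String × String) => p.1) := rfl
    rw [hcomp, pv_ofList_map_ofList]
  rw [hkeys]
  apply List.map_congr_left
  intro k _
  rw [pv_getD_eq]

lemma pv_A_eq (sentences : List String) (n : Int) :
    generate_nth_order_markov_model sentences n
      = ((pvAllPairs sentences n).foldl pvNStep PySem.Dict.empty).items.map
          (fun p => (p.1, p.2.items)) := by
  unfold generate_nth_order_markov_model
  rw [pv_A_top]

lemma pv_B_eq (sentences : List String) (n : Int) :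
    generate_nth_order_markov_model_alt sentences n
      = (((PySem.Dict.counter (pvAllPairs sentences n)).items).foldl pvRStep
          PySem.Dict.empty).items.map (fun p => (p.1, p.2.items)) := by
  unfold generate_nth_order_markov_model_alt
  rw [pv_B_top, pv_counts_eq_counter, pv_R_eq]

-- ===== VERDICT (by name: the statement is the Claim_ definition above) =====
theorem generate_nth_order_markov_model_spec : Claim_equal_generate_nth_order_markov_model := by
  intro sentences n _ _
  unfold Spec_generate_nth_order_markov_model
  rw [pv_A_eq, pv_B_eq, pv_main]
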